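-- pv_equiv track=rewrite | github.com/FP2-lab/malen | lab3/laba3.py | calculate_recursive
-- ===== SOURCE A (Python) =====
-- def calculate_recursive(k, a1, b1):
--     # Базовые условия
--     if k == 1:
--         return a1, b1
--
--     # Рекурсивные вызовы
--     b_prev = b1  # Запоминаем предыдущее значение b
--     a_prev = a1  # Запоминаем предыдущее значение a
--     b_current = 2 * b_prev**2 + b_prev  # Вычисляем текущее значение b
--     a_current = 2 * b_prev + a_prev  # Вычисляем текущее значение a
--
--     return calculate_recursive(k - 1, a_current, b_current)
-- ===== SOURCE B (Python) =====
-- def calculate_recursive(k, a1, b1):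
--     a, b = a1, b1
--     for _ in range(k - 1):
--         a, b = a + 2 * b, 2 * b * b + b
--     return a, b
-- ===== Notes on version B (the rewrite author's own statement) =====
-- stated objective: simpler
-- what changed: Replaces the tail recursion with an iterative for-loop over range(k-1) that updates (a, b) in place; Pre_ excludes k < 1, where A recurses without reaching the base case (no return).
import Mathlib
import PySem

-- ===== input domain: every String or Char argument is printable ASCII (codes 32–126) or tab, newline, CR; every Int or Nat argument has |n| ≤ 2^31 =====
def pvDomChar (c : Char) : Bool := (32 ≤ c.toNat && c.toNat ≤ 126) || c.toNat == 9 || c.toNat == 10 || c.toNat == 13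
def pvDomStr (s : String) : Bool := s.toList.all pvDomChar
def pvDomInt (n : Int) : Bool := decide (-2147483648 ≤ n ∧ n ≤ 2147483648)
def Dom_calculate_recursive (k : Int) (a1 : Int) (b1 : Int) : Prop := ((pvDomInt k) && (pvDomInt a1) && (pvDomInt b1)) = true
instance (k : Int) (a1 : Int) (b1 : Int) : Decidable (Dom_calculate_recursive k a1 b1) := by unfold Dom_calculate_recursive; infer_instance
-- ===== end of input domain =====

-- B replaces A's tail recursion by an iterative fold over range(k-1); objective: simpler (no recursion depth).


-- ===== PORT A =====
-- Literal port of A's recursion. For k < 1 the Python recursion never reaches the base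
-- case (no return); the `k < 1` branch is only a totality guard, excluded by Pre_.
def calculate_recursive (k : Int) (a1 : Int) (b1 : Int) : Int × Int :=
  if k = 1 then (a1, b1)
  else if k < 1 then (a1, b1)  -- totality guard; Python does not return here (outside Pre_)
  else
    let b_prev := b1
    let a_prev := a1
    let b_current := 2 * b_prev ^ 2 + b_prev
    let a_current := 2 * b_prev + a_prev
    calculate_recursive (k - 1) a_current b_current
termination_by (k - 1).toNat
decreasing_by omega

-- ===== PORT B =====
def calculate_recursive_alt (k : Int) (a1 : Int) (b1 : Int) : Int × Int :=
  (List.range (k - 1).toNat).foldl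
    (fun (p : Int × Int) _ => (p.1 + 2 * p.2, 2 * p.2 * p.2 + p.2)) (a1, b1)

-- ===== PRECONDITION & SPEC =====
-- Pre_ excludes k < 1, where Python A recurses past the base case forever (no return).
def Pre_calculate_recursive (k : Int) (a1 : Int) (b1 : Int) : Prop := 1 ≤ k
instance (k : Int) (a1 : Int) (b1 : Int) : Decidable (Pre_calculate_recursive k a1 b1) := by unfold Pre_calculate_recursive; infer_instance
def pvWitness_calculate_recursive : Int × Int × Int := (4, 1, 2)

def Spec_calculate_recursive (k : Int) (a1 : Int) (b1 : Int) (out : Int × Int) : Prop := out = calculate_recursive_alt k a1 b1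
instance (k : Int) (a1 : Int) (b1 : Int) (out : Int × Int) : Decidable (Spec_calculate_recursive k a1 b1 out) := by unfold Spec_calculate_recursive; infer_instance

-- ===== CLAIM (what is proved, stated in full; the proofs are below) =====
def Claim_equal_calculate_recursive : Prop := ∀ (k : Int) (a1 : Int) (b1 : Int), Dom_calculate_recursive k a1 b1 → Pre_calculate_recursive k a1 b1 → Spec_calculate_recursive k a1 b1 (calculate_recursive k a1 b1)

-- ===== LEMMAS AND PROOFS =====

theorem foldl_range_step (n : Nat) (a b : Int) :
    (List.range (n + 1)).foldl
      (fun (p : Int × Int) _ => (p.1 + 2 * p.2, 2 * p.2 * p.2 + p.2)) (a, b)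
    = (List.range n).foldl
      (fun (p : Int × Int) _ => (p.1 + 2 * p.2, 2 * p.2 * p.2 + p.2)) (a + 2 * b, 2 * b * b + b) := by
  rw [List.range_succ_eq_map]
  simp [List.foldl_map]

theorem main_lemma (n : Nat) : ∀ (k a b : Int), k = (n : Int) + 1 →
    calculate_recursive k a b = calculate_recursive_alt k a b := by
  induction n with
  | zero =>
    intro k a b hk
    subst hk
    simp [calculate_recursive, calculate_recursive_alt]
  | succ m ih =>
    intro k a b hk
    rw [calculate_recursive]
    have h1 : ¬ (k = 1) := by omega
    have h2 : ¬ (k < 1) := by omega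
    simp only [h1, h2, if_false]
    rw [ih (k - 1) _ _ (by omega)]
    unfold calculate_recursive_alt
    have hn : (k - 1).toNat = m + 1 := by omega
    have hn' : (k - 1 - 1).toNat = m := by omega
    rw [hn, hn', foldl_range_step]
    ring_nf

-- ===== VERDICT (by name: the statement is the Claim_ definition above) =====
theorem calculate_recursive_spec : Claim_equal_calculate_recursive := by
  intro k a1 b1 _ hpre
  unfold Spec_calculate_recursive
  exact main_lemma (k - 1).toNat k a1 b1 (by unfold Pre_calculate_recursive at hpre; omega)
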